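-- pv_equiv track=rewrite | github.com/volkswagen/3dhd_devkit | deep_learning/losses/weights.py | get_loss_norm_by_elements
-- ===== SOURCE A (Python) =====
-- def get_loss_norm_by_elements(gt_elements_batched):
--     """ Counts map elements to compute weights for loss computation.
--
--     Args:
--         gt_elements_batched (list[dict:list]): contains lists of map elements per element type (list of batches)
--
--     Returns:
--         norm_factors (dict:int): number of map elements per element type
--     """
--
--     norm_factors = {}
--
--     for elements_batch in gt_elements_batched:
--         for element_type, elements in elements_batch.items():
--             if element_type not in norm_factors:
--                 norm_factors[element_type] = len(elements)
--             else:
--                 norm_factors[element_type] += len(elements)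
--
--     for element_type, factor in norm_factors.items():
--         if factor == 0:
--             norm_factors[element_type] = 1
--
--     return norm_factors
-- ===== SOURCE B (Python) =====
-- def get_loss_norm_by_elements(gt_elements_batched):
--     """ Counts map elements to compute weights for loss computation. """
--     types = dict.fromkeys(t for batch in gt_elements_batched for t in batch)
--     return {t: max(1, sum(len(batch.get(t, [])) for batch in gt_elements_batched))
--             for t in types}
-- ===== Notes on version B (the rewrite author's own statement) =====
-- stated objective: simpler
-- what changed: B transposes the traversal: it collects the distinct element types once (dict.fromkeys) and builds the result in a single dict comprehension summing each type's element counts across batches with max(1, total), instead of A's batch-outer accumulation dict followed by a separate zero-to-one fixing pass.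
import Mathlib
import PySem

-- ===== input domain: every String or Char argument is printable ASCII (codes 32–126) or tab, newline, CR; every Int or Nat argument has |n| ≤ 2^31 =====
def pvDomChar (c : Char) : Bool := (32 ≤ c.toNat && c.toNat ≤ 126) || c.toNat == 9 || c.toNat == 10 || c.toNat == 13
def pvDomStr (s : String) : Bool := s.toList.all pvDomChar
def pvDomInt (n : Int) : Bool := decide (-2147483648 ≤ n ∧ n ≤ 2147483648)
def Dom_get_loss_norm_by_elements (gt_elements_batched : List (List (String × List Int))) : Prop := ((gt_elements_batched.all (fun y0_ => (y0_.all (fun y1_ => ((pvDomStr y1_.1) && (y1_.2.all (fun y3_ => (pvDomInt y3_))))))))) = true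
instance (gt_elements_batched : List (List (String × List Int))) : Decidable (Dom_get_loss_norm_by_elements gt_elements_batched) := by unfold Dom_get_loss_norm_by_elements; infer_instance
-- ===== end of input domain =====

-- B transposes the traversal: it collects the element types once and sums each type's
-- counts across batches in a dict comprehension, folding the zero→1 rule into max(1, ·)
-- (objective: simpler — one comprehension instead of accumulate-then-fix passes).

-- ===== PORT A =====
def get_loss_norm_by_elements (gt_elements_batched : List (List (String × List Int))) : List (String × Int) :=
  let nf : PySem.Dict String Int :=
    gt_elements_batched.foldl (fun nf batch =>
      batch.foldl (fun nf p =>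
        if nf.contains p.1 then nf.insert p.1 (nf.getD p.1 0 + (p.2.length : Int))
        else nf.insert p.1 ((p.2.length : Int))) nf) PySem.Dict.empty
  (nf.items.foldl (fun d kv => if kv.2 = 0 then d.insert kv.1 1 else d) nf).items

-- ===== PORT B =====
def get_loss_norm_by_elements_alt (gt_elements_batched : List (List (String × List Int))) : List (String × Int) :=
  let types := PySem.List.dedup (gt_elements_batched.flatMap (fun batch => (PySem.Dict.mk batch).keys))
  types.map (fun t =>
    (t, max 1 (gt_elements_batched.foldl
          (fun s batch => s + (((PySem.Dict.mk batch).getD t []).length : Int)) 0)))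

-- ===== PRECONDITION & SPEC =====
-- Pre_ requires each batch's keys to be distinct: every Python batch is a dict, so an
-- association list with a duplicated key represents no Python input at all.
def Pre_get_loss_norm_by_elements (gt_elements_batched : List (List (String × List Int))) : Prop :=
  ∀ b ∈ gt_elements_batched, (b.map Prod.fst).Nodup
instance (gt_elements_batched : List (List (String × List Int))) : Decidable (Pre_get_loss_norm_by_elements gt_elements_batched) := by unfold Pre_get_loss_norm_by_elements; infer_instance
def pvWitness_get_loss_norm_by_elements : (List (List (String × List Int))) :=
  [[("lane", [1, 2]), ("pole", [])], [("lane", [3])], []]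
def Spec_get_loss_norm_by_elements (gt_elements_batched : List (List (String × List Int))) (out : List (String × Int)) : Prop := out = get_loss_norm_by_elements_alt gt_elements_batched
instance (gt_elements_batched : List (List (String × List Int))) (out : List (String × Int)) : Decidable (Spec_get_loss_norm_by_elements gt_elements_batched out) := by unfold Spec_get_loss_norm_by_elements; infer_instance

-- ===== CLAIM (what is proved, stated in full; the proofs are below) =====
def Claim_equal_get_loss_norm_by_elements : Prop := ∀ (gt_elements_batched : List (List (String × List Int))), Dom_get_loss_norm_by_elements gt_elements_batched → Pre_get_loss_norm_by_elements gt_elements_batched → Spec_get_loss_norm_by_elements gt_elements_batched (get_loss_norm_by_elements gt_elements_batched)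

-- ===== LEMMAS AND PROOFS =====

-- total length of elements of type t in a list of (type, elements) pairs
def pvW (t : String) (l : List (String × List Int)) : Int :=
  ((l.filter (fun p => p.1 == t)).map (fun p => (p.2.length : Int))).sum

theorem pvW_cons_pos (t : String) (p : String × List Int) (l : List (String × List Int))
    (h : p.1 = t) : pvW t (p :: l) = (p.2.length : Int) + pvW t l := by
  simp [pvW, h]

theorem pvW_cons_neg (t : String) (p : String × List Int) (l : List (String × List Int))
    (h : p.1 ≠ t) : pvW t (p :: l) = pvW t l := by
  simp [pvW, h]

theorem pvW_append (t : String) (l1 l2 : List (String × List Int)) :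
    pvW t (l1 ++ l2) = pvW t l1 + pvW t l2 := by
  simp [pvW, List.filter_append]

theorem pvW_of_not_mem (t : String) (l : List (String × List Int))
    (h : t ∉ l.map Prod.fst) : pvW t l = 0 := by
  induction l with
  | nil => rfl
  | cons p l ih =>
    simp only [List.map_cons, List.mem_cons, not_or] at h
    rw [pvW_cons_neg t p l (fun he => h.1 he.symm)]
    exact ih h.2

theorem pvW_nonneg (t : String) (l : List (String × List Int)) : 0 ≤ pvW t l := by
  apply List.sum_nonneg
  intro x hx
  simp only [List.mem_map] at hx
  obtain ⟨p, _, rfl⟩ := hx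
  positivity

-- A's inner step is the unconditional "insert running sum" step
theorem pv_stepA_eq :
    (fun (nf : PySem.Dict String Int) (p : String × List Int) =>
      if nf.contains p.1 then nf.insert p.1 (nf.getD p.1 0 + (p.2.length : Int))
      else nf.insert p.1 ((p.2.length : Int)))
    = (fun nf p => nf.insert p.1 (nf.getD p.1 0 + (p.2.length : Int))) := by
  funext nf p
  by_cases h : nf.contains p.1
  · simp [h]
  · simp only [Bool.not_eq_true] at h
    rw [PySem.Dict.getD_of_not_contains nf 0 h]
    simp [h]

theorem pv_foldl_nested {α : Type} (g : List (List α)) {β : Type}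
    (step : β → α → β) (d : β) :
    g.foldl (fun nf b => b.foldl step nf) d = (g.flatMap id).foldl step d := by
  induction g generalizing d with
  | nil => rfl
  | cons b g ih => simp [List.foldl_append, ih]

theorem pv_getD_fold (l : List (String × List Int)) (d : PySem.Dict String Int) (t : String) :
    (l.foldl (fun nf p => nf.insert p.1 (nf.getD p.1 0 + (p.2.length : Int))) d).getD t 0
      = d.getD t 0 + pvW t l := by
  induction l generalizing d with
  | nil => simp [pvW]
  | cons p l ih =>
    simp only [List.foldl_cons, ih]
    rw [PySem.Dict.getD_insert]
    by_cases h : t = p.1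
    · rw [if_pos h, pvW_cons_pos t p l h.symm, h]
      ring
    · rw [if_neg h, pvW_cons_neg t p l (fun he => h he.symm)]

-- second pass: keys are unchanged
theorem pv_fix_keys (l : List (String × Int)) (d : PySem.Dict String Int)
    (hm : ∀ kv ∈ l, d.contains kv.1 = true) :
    (l.foldl (fun d kv => if kv.2 = 0 then d.insert kv.1 1 else d) d).keys = d.keys := by
  induction l generalizing d with
  | nil => rfl
  | cons kv l ih =>
    simp only [List.foldl_cons]
    by_cases h : kv.2 = 0
    · have hc : d.contains kv.1 = true := hm kv (by simp)
      rw [if_pos h, ih]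
      · exact PySem.Dict.keys_insert_of_contains _ _ hc
      · intro q hq
        rw [PySem.Dict.contains_insert]
        simp [hm q (by simp [hq])]
    · rw [if_neg h]
      exact ih d (fun q hq => hm q (by simp [hq]))

-- second pass: value becomes 1 exactly where (t, 0) is among the processed items
theorem pv_fix_getD (l : List (String × Int)) (d : PySem.Dict String Int) (t : String)
    (hn : (l.map Prod.fst).Nodup) (hm : ∀ kv ∈ l, d.get? kv.1 = some kv.2) :
    (l.foldl (fun d kv => if kv.2 = 0 then d.insert kv.1 1 else d) d).getD t 0
      = if (t, (0 : Int)) ∈ l then 1 else d.getD t 0 := by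
  induction l generalizing d with
  | nil => simp
  | cons kv l ih =>
    simp only [List.map_cons, List.nodup_cons] at hn
    simp only [List.foldl_cons]
    by_cases h : kv.2 = 0
    · rw [if_pos h]
      have hrest : ∀ q ∈ l, (d.insert kv.1 1).get? q.1 = some q.2 := by
        intro q hq
        have hne : q.1 ≠ kv.1 := by
          intro he
          exact hn.1 (he ▸ List.mem_map_of_mem hq)
        rw [PySem.Dict.get?_insert_of_ne d 1 hne]
        exact hm q (by simp [hq])
      rw [ih (d.insert kv.1 1) hn.2 hrest]
      by_cases hmem : (t, (0 : Int)) ∈ l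
      · simp [hmem]
      · by_cases ht : (t, (0 : Int)) = kv
        · simp [← ht]
        · have htk : t ≠ kv.1 := by
            intro he
            exact ht (by rw [Prod.ext_iff]; exact ⟨he, h.symm⟩)
          simp [hmem, ht, PySem.Dict.getD_insert, htk]
    · rw [if_neg h]
      rw [ih d hn.2 (fun q hq => hm q (by simp [hq]))]
      have hne : (t, (0 : Int)) ≠ kv := by
        intro he
        exact h (by rw [← he])
      simp [hne]

-- per batch with distinct keys, the dict lookup length is pvW
theorem pv_batch_len (t : String) (b : List (String × List Int))
    (hb : (b.map Prod.fst).Nodup) :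
    (((PySem.Dict.mk b).getD t []).length : Int) = pvW t b := by
  induction b with
  | nil => simp [PySem.Dict.getD, PySem.Dict.get?, pvW]
  | cons p rest ih =>
    simp only [List.map_cons, List.nodup_cons] at hb
    rw [PySem.Dict.getD_eq_get?_getD, PySem.Dict.get?_mk_cons]
    by_cases h : p.1 = t
    · have hz : pvW t rest = 0 := pvW_of_not_mem t rest (h ▸ hb.1)
      have hc : (p.1 == t) = true := by simp [h]
      rw [hc, if_pos rfl, pvW_cons_pos t p rest h, hz]
      simp
    · have hc : (p.1 == t) = false := by simp [h]
      rw [hc, pvW_cons_neg t p rest h]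
      simp only [Bool.false_eq_true, if_false]
      rw [← PySem.Dict.getD_eq_get?_getD, ih hb.2]

theorem pv_foldl_add {α : Type} (g : List α) (f : α → Int) (c : Int) :
    g.foldl (fun s b => s + f b) c = c + (g.map f).sum := by
  induction g generalizing c with
  | nil => simp
  | cons b g ih => simp [ih]; ring

theorem pv_pvW_flat (t : String) (g : List (List (String × List Int))) :
    pvW t (g.flatMap id) = (g.map (pvW t)).sum := by
  induction g with
  | nil => rfl
  | cons b g ih =>
    rw [List.flatMap_cons, pvW_append, ih]
    simp

-- ===== VERDICT (by name: the statement is the Claim_ definition above) =====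
theorem get_loss_norm_by_elements_spec : Claim_equal_get_loss_norm_by_elements := by
  intro g _ hpre
  unfold Spec_get_loss_norm_by_elements get_loss_norm_by_elements get_loss_norm_by_elements_alt
  rw [pv_stepA_eq, pv_foldl_nested]
  set flat := g.flatMap id with hflat
  set nf := flat.foldl (fun nf p => nf.insert p.1 (nf.getD p.1 0 + (p.2.length : Int))) PySem.Dict.empty with hnf
  have hkeys : nf.keys = PySem.Set.ofList (flat.map Prod.fst) := by
    rw [hnf, PySem.Dict.keys_foldl_insert_key]
    simp [PySem.Set.update, PySem.Set.ofList_eq_foldl, PySem.Dict.keys, PySem.Dict.empty]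
  have hnodup : nf.keys.Nodup := by
    rw [hkeys]; exact PySem.Set.nodup_ofList _
  have hgetD : ∀ t, nf.getD t 0 = pvW t flat := by
    intro t
    rw [hnf, pv_getD_fold]
    simp
  -- second pass
  have hcont : ∀ kv ∈ nf.items, nf.contains kv.1 = true := by
    intro kv hkv
    rw [PySem.Dict.contains_iff_mem_keys]
    exact PySem.Dict.mem_keys_of_mem_items nf hkv
  have hget : ∀ kv ∈ nf.items, nf.get? kv.1 = some kv.2 := by
    intro kv hkv
    exact PySem.Dict.get?_of_mem_items nf hkv hnodup
  set nf2 := nf.items.foldl (fun d kv => if kv.2 = 0 then d.insert kv.1 1 else d) nf with hnf2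
  have hkeys2 : nf2.keys = nf.keys := pv_fix_keys _ _ hcont
  have hitems : nf2.items = nf2.keys.map (fun k => (k, nf2.getD k 0)) :=
    PySem.Dict.items_eq_map_keys nf2 (hkeys2 ▸ hnodup) 0
  rw [hitems, hkeys2, hkeys]
  -- right-hand side types
  have htypes : PySem.List.dedup (g.flatMap (fun batch => (PySem.Dict.mk batch).keys))
      = PySem.Set.ofList (flat.map Prod.fst) := by
    simp [PySem.Dict.keys, hflat, List.flatMap_def, List.map_flatten]
  rw [htypes]
  apply List.map_congr_left
  intro t ht
  have hmemkeys : t ∈ nf.keys := by rw [hkeys]; exact ht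
  -- value on the A side
  have hval : nf2.getD t 0 = if nf.getD t 0 = 0 then 1 else nf.getD t 0 := by
    rw [hnf2, pv_fix_getD _ _ _ (by simpa [PySem.Dict.keys] using hnodup) hget]
    have hiff : (t, (0 : Int)) ∈ nf.items ↔ nf.getD t 0 = 0 := by
      constructor
      · intro hmem
        exact PySem.Dict.getD_of_mem_items nf hmem hnodup 0
      · intro h0
        have hc : nf.contains t = true := by
          rw [PySem.Dict.contains_iff_mem_keys]; exact hmemkeys
        have : nf.get? t = some (0 : Int) := by
          rw [PySem.Dict.contains_eq_isSome_get?] at hc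
          obtain ⟨v, hv⟩ := Option.isSome_iff_exists.mp hc
          rw [hv]
          rw [PySem.Dict.getD_eq_get?_getD, hv] at h0
          simpa using h0
        exact PySem.Dict.mem_items_of_get?_eq_some nf this
    by_cases h0 : nf.getD t 0 = 0 <;> simp [hiff, h0]
  rw [hval]
  -- value on the B side
  have hsum : g.foldl (fun s batch => s + (((PySem.Dict.mk batch).getD t []).length : Int)) 0
      = pvW t flat := by
    rw [pv_foldl_add]
    rw [List.map_congr_left (fun b hb => pv_batch_len t b (hpre b hb))]
    rw [pv_pvW_flat]
    ring
  rw [hsum, hgetD t]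
  have hpos := pvW_nonneg t flat
  by_cases h0 : pvW t flat = 0
  · simp [h0]
  · have h1 : (1 : Int) ≤ pvW t flat := by omega
    simp only [h0, if_false, max_eq_right h1]
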